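-- pv_equiv track=rewrite | github.com/mohammadfaiizan/ProjectI | DSA/Problem/Graph/01_Graph_Fundamentals_Representations/Advanced_Graph_Construction.py | _ensure_connected
-- ===== SOURCE A (Python) =====
-- from typing import List, Dict, Set, Tuple, Optional, Union
-- from collections import defaultdict, deque
--
-- def _ensure_connected(n: int, edges: List[List[int]]) -> List[List[int]]:
--     """Ensure graph is connected by adding necessary edges"""
--     if n <= 1:
--         return edges
--
--     # Find connected components
--     adj = defaultdict(set)
--     for u, v in edges:
--         adj[u].add(v)
--         adj[v].add(u)
--
--     visited = set()
--     components = []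
--
--     def dfs(v, component):
--         visited.add(v)
--         component.append(v)
--         for u in adj[v]:
--             if u not in visited:
--                 dfs(u, component)
--
--     for i in range(n):
--         if i not in visited:
--             component = []
--             dfs(i, component)
--             components.append(component)
--
--     # Connect components
--     result_edges = edges[:]
--     for i in range(len(components) - 1):
--         u = components[i][0]
--         v = components[i + 1][0]
--         result_edges.append([u, v])
--
--     return result_edges
-- ===== SOURCE B (Python) =====
-- def _ensure_connected(n, edges):
--     """Ensure graph is connected by adding necessary edges"""
--     if n <= 1:
--         return edges
--
--     # Merge-by-relabelling: label[x] is a canonical member of x's component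
--     label = {}
--     for u, v in edges:
--         lu = label.setdefault(u, u)
--         lv = label.setdefault(v, v)
--         if lu != lv:
--             for w in list(label):
--                 if label[w] == lv:
--                     label[w] = lu
--
--     # Walk 0..n-1; the first vertex of each component is its representative;
--     # link each new representative to the previous one.
--     result = edges[:]
--     seen = set()
--     prev = None
--     for i in range(n):
--         li = label.get(i, i)
--         if li not in seen:
--             seen.add(li)
--             if prev is not None:
--                 result.append([prev, i])
--             prev = i
--     return result
-- ===== Notes on version B (the rewrite author's own statement) =====
-- stated objective: alternative
-- what changed: Recursive DFS over a defaultdict adjacency plus an explicit components list is replaced by a merge-by-relabelling partition (a flat label map merged edge by edge) and a single first-occurrence scan over range(n) that links consecutive component representatives directly, with no adjacency structure, no recursion and no components list.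
import Mathlib
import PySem

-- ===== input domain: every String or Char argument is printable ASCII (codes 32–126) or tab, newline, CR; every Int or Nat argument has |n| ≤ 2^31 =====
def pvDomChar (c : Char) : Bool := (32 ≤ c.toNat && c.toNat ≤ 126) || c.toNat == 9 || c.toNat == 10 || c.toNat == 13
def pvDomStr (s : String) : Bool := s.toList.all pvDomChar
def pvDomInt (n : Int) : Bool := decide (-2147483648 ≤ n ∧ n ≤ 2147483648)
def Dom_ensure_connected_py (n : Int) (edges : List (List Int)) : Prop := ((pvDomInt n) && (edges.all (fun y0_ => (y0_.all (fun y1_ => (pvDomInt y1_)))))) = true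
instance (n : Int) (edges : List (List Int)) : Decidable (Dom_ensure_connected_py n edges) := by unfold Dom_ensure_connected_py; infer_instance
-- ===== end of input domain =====

-- B replaces A's recursive DFS + components list by a merge-by-relabelling label map and one
-- first-occurrence scan over range(n); same return value on every input where A returns (alternative, not faster).

-- ===== PORT A =====
-- adj = defaultdict(set); for u, v in edges: adj[u].add(v); adj[v].add(u)
def pvAdjA (edges : List (List Int)) : PySem.Dict Int (PySem.Set Int) :=
  edges.foldl (fun adj e =>
    match e with
    | [u, v] =>
        (adj.modify u [] (fun s => PySem.Set.add s v)).modify v [] (fun s => PySem.Set.add s u)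
    | _ => adj) PySem.Dict.empty

-- recursive dfs(v, component); fuel-guarded (the call site passes fuel that provably never runs out)
def pvDfsA (adj : PySem.Dict Int (PySem.Set Int)) :
    Nat → Int → PySem.Set Int × List Int → PySem.Set Int × List Int
  | 0, _, st => st
  | fuel + 1, v, st =>
      (adj.getD v []).foldl
        (fun st u => if st.1.contains u then st else pvDfsA adj fuel u st)
        (PySem.Set.add st.1 v, st.2 ++ [v])

def ensure_connected_py (n : Int) (edges : List (List Int)) : List (List Int) :=
  if n ≤ 1 then edges
  else
    let adj := pvAdjA edges
    let st :=
      (PySem.List.pyRange 0 n 1).foldl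
        (fun (st : PySem.Set Int × List (List Int)) i =>
          if st.1.contains i then st
          else
            let r := pvDfsA adj (2 * edges.length + 1) i (st.1, [])
            (r.1, st.2 ++ [r.2]))
        ([], [])
    let components := st.2
    (PySem.List.pyRange 0 ((components.length : Int) - 1) 1).foldl
      (fun res i =>
        res ++ [[PySem.List.pyGetD (PySem.List.pyGetD components i []) 0 0,
                 PySem.List.pyGetD (PySem.List.pyGetD components (i + 1) []) 0 0]])
      edges

-- ===== PORT B =====
-- label = {}; for u, v in edges: lu = label.setdefault(u, u); lv = label.setdefault(v, v);
--   if lu != lv: for w in list(label): if label[w] == lv: label[w] = lu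
def pvMergeB (edges : List (List Int)) : PySem.Dict Int Int :=
  edges.foldl (fun lab e =>
    match e with
    | [u, v] =>
        let lu := lab.getD u u
        let lab := lab.setdefault u u
        let lv := lab.getD v v
        let lab := lab.setdefault v v
        if lu ≠ lv then
          PySem.Dict.mk (lab.items.map (fun p => if p.2 == lv then (p.1, lu) else p))
        else lab
    | _ => lab) PySem.Dict.empty

def ensure_connected_py_alt (n : Int) (edges : List (List Int)) : List (List Int) :=
  if n ≤ 1 then edges
  else
    let lab := pvMergeB edges
    let st :=
      (PySem.List.pyRange 0 n 1).foldl
        (fun (st : List (List Int) × PySem.Set Int × Option Int) i =>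
          let li := lab.getD i i
          if st.2.1.contains li then st
          else
            ((match st.2.2 with
              | none => st.1
              | some p => st.1 ++ [[p, i]]),
             PySem.Set.add st.2.1 li, some i))
        (edges, [], none)
    st.1

-- ===== PRECONDITION & SPEC =====
-- Pre_ excludes only inputs where Python A raises: with n ≥ 2, an edge row that is not a
-- 2-element list makes 'for u, v in edges' raise ValueError/TypeError (B raises there too).
def Pre_ensure_connected_py (n : Int) (edges : List (List Int)) : Prop :=
  n ≤ 1 ∨ ∀ e ∈ edges, e.length = 2
instance (n : Int) (edges : List (List Int)) : Decidable (Pre_ensure_connected_py n edges) := by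
  unfold Pre_ensure_connected_py; infer_instance
def pvWitness_ensure_connected_py : Int × List (List Int) := (3, [[0, 1]])

def Spec_ensure_connected_py (n : Int) (edges : List (List Int)) (out : List (List Int)) : Prop := out = ensure_connected_py_alt n edges
instance (n : Int) (edges : List (List Int)) (out : List (List Int)) : Decidable (Spec_ensure_connected_py n edges out) := by unfold Spec_ensure_connected_py; infer_instance

-- ===== CLAIM (what is proved, stated in full; the proofs are below) =====
def Claim_equal_ensure_connected_py : Prop := ∀ (n : Int) (edges : List (List Int)), Dom_ensure_connected_py n edges → Pre_ensure_connected_py n edges → Spec_ensure_connected_py n edges (ensure_connected_py n edges)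

-- ===== LEMMAS AND PROOFS =====

-- one undirected edge step of the graph, and connectivity = its reflexive-transitive closure
def pvStep (edges : List (List Int)) (x y : Int) : Prop :=
  ∃ u v, [u, v] ∈ edges ∧ ((x = u ∧ y = v) ∨ (x = v ∧ y = u))

def pvConn (edges : List (List Int)) : Int → Int → Prop :=
  Relation.ReflTransGen (pvStep edges)

theorem pvStep_symm (edges : List (List Int)) : Symmetric (pvStep edges) := by
  rintro a b ⟨u, v, hm, h⟩
  exact ⟨u, v, hm, by tauto⟩

theorem pvConn_symm (edges : List (List Int)) {x y : Int} (h : pvConn edges x y) :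
    pvConn edges y x :=
  Relation.ReflTransGen.symmetric (pvStep_symm edges) h

theorem pvConn_append_invalid {es : List (List Int)} {e : List Int}
    (he : ∀ u v : Int, e ≠ [u, v]) (x y : Int) :
    pvConn (es ++ [e]) x y ↔ pvConn es x y := by
  constructor
  · intro h
    refine Relation.ReflTransGen.mono ?_ h
    rintro a b ⟨u, v, hm, hd⟩
    simp only [List.mem_append, List.mem_singleton] at hm
    rcases hm with hm | hm
    · exact ⟨u, v, hm, hd⟩
    · exact absurd hm.symm (he u v)
  · intro h
    refine Relation.ReflTransGen.mono ?_ h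
    rintro a b ⟨u, v, hm, hd⟩
    exact ⟨u, v, by simp [hm], hd⟩

theorem pvConn_mono {es : List (List Int)} {e : List Int} {x y : Int}
    (h : pvConn es x y) : pvConn (es ++ [e]) x y := by
  refine Relation.ReflTransGen.mono ?_ h
  rintro a b ⟨u, v, hm, hd⟩
  exact ⟨u, v, by simp [hm], hd⟩

theorem pvConn_nil (x y : Int) : pvConn [] x y ↔ x = y := by
  constructor
  · intro h
    induction h with
    | refl => rfl
    | tail _ hs ih => rcases hs with ⟨u, v, hm, _⟩; simp at hm
  · rintro rfl; exact .refl

theorem pvConn_append_valid {es : List (List Int)} {u v : Int} (x y : Int) :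
    pvConn (es ++ [[u, v]]) x y ↔
      pvConn es x y ∨ (pvConn es x u ∧ pvConn es v y) ∨ (pvConn es x v ∧ pvConn es u y) := by
  constructor
  · intro h
    induction h with
    | refl => exact Or.inl .refl
    | tail _ hs ih =>
        rename_i w z _
        rcases hs with ⟨a, b, hm, hd⟩
        simp only [List.mem_append, List.mem_singleton] at hm
        rcases hm with hm | hm
        · have hstep : pvStep es w z := ⟨a, b, hm, hd⟩
          rcases ih with h1 | ⟨h1, h2⟩ | ⟨h1, h2⟩
          · exact Or.inl (h1.tail hstep)
          · exact Or.inr (Or.inl ⟨h1, h2.tail hstep⟩)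
          · exact Or.inr (Or.inr ⟨h1, h2.tail hstep⟩)
        · injection hm with h1 h2
          subst h1
          injection h2 with h2 _
          subst h2
          rcases hd with ⟨rfl, rfl⟩ | ⟨rfl, rfl⟩
          · rcases ih with h1 | ⟨h1, h2⟩ | ⟨h1, h2⟩
            · exact Or.inr (Or.inl ⟨h1, .refl⟩)
            · exact Or.inr (Or.inl ⟨h1, .refl⟩)
            · exact Or.inl h1
          · rcases ih with h1 | ⟨h1, h2⟩ | ⟨h1, h2⟩
            · exact Or.inr (Or.inr ⟨h1, .refl⟩)
            · exact Or.inl h1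
            · exact Or.inr (Or.inr ⟨h1, .refl⟩)
  · have hedge : pvStep (es ++ [[u, v]]) u v := ⟨u, v, by simp, Or.inl ⟨rfl, rfl⟩⟩
    have hedge' : pvStep (es ++ [[u, v]]) v u := ⟨u, v, by simp, Or.inr ⟨rfl, rfl⟩⟩
    rintro (h | ⟨h1, h2⟩ | ⟨h1, h2⟩)
    · exact pvConn_mono h
    · exact (((pvConn_mono h1).tail hedge).trans (pvConn_mono h2))
    · exact (((pvConn_mono h1).tail hedge').trans (pvConn_mono h2))

-- canonical label of a vertex after B's merge pass
def pvL (edges : List (List Int)) (x : Int) : Int := (pvMergeB edges).getD x x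

-- "i is the first vertex of its component among 0..n-1"
def pvPred (edges : List (List Int)) (i : Int) : Bool :=
  decide (∀ j ∈ PySem.List.pyRange 0 i 1, pvL edges j ≠ pvL edges i)

def pvReps (edges : List (List Int)) (i : Int) : List Int :=
  (PySem.List.pyRange 0 i 1).filter (pvPred edges)

def pvConsecPairs : List Int → List (List Int)
  | a :: b :: t => [a, b] :: pvConsecPairs (b :: t)
  | _ => []

theorem pvGet?_mk_map_values (l : List (Int × Int)) (g : Int → Int) (k : Int) :
    (PySem.Dict.mk (l.map (fun p => (p.1, g p.2)))).get? k = ((PySem.Dict.mk l).get? k).map g := by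
  induction l with
  | nil => rfl
  | cons p t ih =>
      obtain ⟨a, b⟩ := p
      simp only [List.map_cons, PySem.Dict.get?_mk_cons]
      by_cases h : (a == k) = true <;> simp [h, ih]

def pvLabInv (es : List (List Int)) (d : PySem.Dict Int Int) : Prop :=
  (∀ u v : Int, [u, v] ∈ es → d.contains u = true ∧ d.contains v = true) ∧
  (∀ x : Int, d.contains x = true → d.contains (d.getD x x) = true) ∧
  (∀ x : Int, d.getD (d.getD x x) (d.getD x x) = d.getD x x) ∧
  (∀ x y : Int, d.getD x x = d.getD y y ↔ pvConn es x y)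

def pvMergeStep (lab : PySem.Dict Int Int) (e : List Int) : PySem.Dict Int Int :=
  match e with
  | [u, v] =>
      let lu := lab.getD u u
      let lab := lab.setdefault u u
      let lv := lab.getD v v
      let lab := lab.setdefault v v
      if lu ≠ lv then
        PySem.Dict.mk (lab.items.map (fun p => if p.2 == lv then (p.1, lu) else p))
      else lab
  | _ => lab

theorem pvMergeB_snoc (es : List (List Int)) (e : List Int) :
    pvMergeB (es ++ [e]) = pvMergeStep (pvMergeB es) e := by
  rw [pvMergeB, List.foldl_append]
  rfl

-- getD x x is unchanged by setdefault k k
theorem pvGetD_setdefault_id (d : PySem.Dict Int Int) (k x : Int) :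
    (d.setdefault k k).getD x x = d.getD x x := by
  by_cases hc : d.contains k = true
  · rw [PySem.Dict.setdefault_of_contains _ _ hc]
  · rw [PySem.Dict.setdefault_of_not_contains _ _ (by simpa using hc)]
    rw [PySem.Dict.getD_insert]
    by_cases hx : x = k
    · subst hx
      rw [PySem.Dict.getD_of_not_contains _ _ (by simpa using hc)]
      simp
    · simp [hx]

theorem pvMergeB_inv (edges : List (List Int)) : pvLabInv edges (pvMergeB edges) := by
  induction edges using List.reverseRecOn with
  | nil =>
      refine ⟨by simp, ?_, ?_, ?_⟩
      · intro x hx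
        rw [pvMergeB] at hx
        simp [PySem.Dict.contains_empty] at hx
      · intro x
        rw [pvMergeB]
        simp [PySem.Dict.getD_empty]
      · intro x y
        rw [pvMergeB]
        simp only [List.foldl_nil, PySem.Dict.getD_empty]
        exact (pvConn_nil x y).symm
  | append_singleton es e ih =>
      obtain ⟨ihE, ihVK, ihC, ihK⟩ := ih
      rw [pvMergeB_snoc]
      rcases e with _ | ⟨u, _ | ⟨v, _ | ⟨w, t⟩⟩⟩
      · -- e = []
        rw [show pvMergeStep (pvMergeB es) [] = pvMergeB es from rfl]
        refine ⟨?_, ihVK, ihC, ?_⟩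
        · intro a b hm
          rcases List.mem_append.mp hm with h | h
          · exact ihE a b h
          · simp at h
        · intro x y
          rw [ihK, pvConn_append_invalid (by intro a b h; simp at h)]
      · -- e = [u]
        rw [show pvMergeStep (pvMergeB es) [u] = pvMergeB es from rfl]
        refine ⟨?_, ihVK, ihC, ?_⟩
        · intro a b hm
          rcases List.mem_append.mp hm with h | h
          · exact ihE a b h
          · simp at h
        · intro x y
          rw [ihK, pvConn_append_invalid (by intro a b h; simp at h)]
      · -- e = [u, v]
        show pvLabInv (es ++ [[u, v]])
          (let lu := (pvMergeB es).getD u u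
           let lab := (pvMergeB es).setdefault u u
           let lv := lab.getD v v
           let lab := lab.setdefault v v
           if lu ≠ lv then
             PySem.Dict.mk (lab.items.map (fun p => if p.2 == lv then (p.1, lu) else p))
           else lab)
        set d := pvMergeB es with hd
        set lu := d.getD u u with hlu
        set d1 := d.setdefault u u with hd1
        set lv := d1.getD v v with hlv
        set d2 := d1.setdefault v v with hd2
        have Fget1 : ∀ x, d1.getD x x = d.getD x x := fun x => pvGetD_setdefault_id d u x
        have Fget2 : ∀ x, d2.getD x x = d.getD x x := by
          intro x
          rw [hd2]
          rw [show d1.setdefault v v = d1.setdefault v v from rfl]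
          rw [pvGetD_setdefault_id d1 v x, Fget1]
        have hlv' : lv = d.getD v v := by rw [hlv, Fget1]
        have hcont2 : ∀ x, d2.contains x = (x == v || (x == u || d.contains x)) := by
          intro x
          rw [hd2, PySem.Dict.contains_setdefault, hd1, PySem.Dict.contains_setdefault]
        have hcontmono : ∀ x, d.contains x = true → d2.contains x = true := by
          intro x hx
          rw [hcont2, hx]
          simp
        have hcontu : d2.contains u = true := by rw [hcont2]; simp
        have hcontv : d2.contains v = true := by rw [hcont2]; simp
        have d2VK : ∀ x, d2.contains x = true → d2.contains (d2.getD x x) = true := by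
          intro x hx
          rw [Fget2]
          by_cases hdx : d.contains x = true
          · exact hcontmono _ (ihVK x hdx)
          · rw [PySem.Dict.getD_of_not_contains _ _ (by simpa using hdx)]
            exact hx
        have hlukey : d2.contains lu = true := by
          by_cases hdu : d.contains u = true
          · exact hcontmono _ (ihVK u hdu)
          · rw [hlu, PySem.Dict.getD_of_not_contains _ _ (by simpa using hdu)]
            exact hcontu
        have hlvkey : d2.contains lv = true := by
          by_cases hdv : d.contains v = true
          · rw [hlv']
            exact hcontmono _ (ihVK v hdv)
          · rw [hlv', PySem.Dict.getD_of_not_contains _ _ (by simpa using hdv)]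
            exact hcontv
        by_cases hne : lu ≠ lv
        · -- relabel branch
          rw [if_pos hne]
          set g : Int → Int := fun w => if w = lv then lu else w with hg
          set d3 := PySem.Dict.mk (d2.items.map (fun p => if p.2 == lv then (p.1, lu) else p)) with hd3
          have hmapeq : d2.items.map (fun p => if p.2 == lv then (p.1, lu) else p) =
              d2.items.map (fun p => (p.1, g p.2)) := by
            refine List.map_congr_left ?_
            rintro ⟨a, b⟩ _
            by_cases hb : b = lv
            · simp [hb, hg]
            · simp [hb, hg, beq_iff_eq]
          have hget3 : ∀ x, d3.get? x = (d2.get? x).map g := by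
            intro x
            rw [hd3, hmapeq]
            exact pvGet?_mk_map_values d2.items g x
          have hcont3 : ∀ x, d3.contains x = d2.contains x := by
            intro x
            rw [PySem.Dict.contains_eq_isSome_get?, PySem.Dict.contains_eq_isSome_get?, hget3]
            cases d2.get? x <;> rfl
          have G : ∀ x, d3.getD x x = g (d2.getD x x) := by
            intro x
            rw [PySem.Dict.getD_eq_get?_getD, hget3]
            cases hq : d2.get? x with
            | none =>
                have hnc : d2.contains x = false := (PySem.Dict.get?_eq_none_iff_contains _ _).mp hq
                rw [PySem.Dict.getD_of_not_contains _ _ hnc]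
                have hxlv : x ≠ lv := by
                  intro hxl
                  rw [hxl] at hnc
                  rw [hlvkey] at hnc
                  exact Bool.true_eq_false.mp hnc
                simp [hg, hxlv]
            | some w =>
                have hw : d2.getD x x = w := PySem.Dict.getD_of_get?_eq_some d2 x hq
                rw [hw]
                rfl
          have G' : ∀ x, d3.getD x x = g (d.getD x x) := by
            intro x; rw [G, Fget2]
          have hgiff : ∀ a b : Int, g a = g b ↔ (a = b ∨ (a = lu ∧ b = lv) ∨ (a = lv ∧ b = lu)) := by
            intro a b
            by_cases ha : a = lv <;> by_cases hb : b = lv <;> simp [hg, ha, hb] <;> tauto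
          refine ⟨?_, ?_, ?_, ?_⟩
          · intro a b hm
            rcases List.mem_append.mp hm with h | h
            · obtain ⟨h1, h2⟩ := ihE a b h
              rw [hcont3, hcont3]
              exact ⟨hcontmono _ h1, hcontmono _ h2⟩
            · simp only [List.mem_singleton] at h
              injection h with h1 h2
              injection h2 with h2 _
              subst h1 h2
              rw [hcont3, hcont3]
              exact ⟨hcontu, hcontv⟩
          · intro x hx
            rw [hcont3] at hx
            rw [hcont3, G']
            by_cases hxl : d.getD x x = lv
            · rw [hg]
              simp only [hxl, if_true]
              exact hlukey
            · rw [hg]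
              simp only [hxl, if_false]
              rw [← Fget2]
              exact d2VK x hx
          · intro x
            rw [G', G']
            by_cases hxl : d.getD x x = lv
            · have h1 : g (d.getD x x) = lu := by simp [hg, hxl]
              rw [h1]
              have hlulu : d.getD lu lu = lu := by rw [hlu]; exact ihC u
              rw [hlulu]
              simp [hg]
            · have h1 : g (d.getD x x) = d.getD x x := by simp [hg, hxl]
              rw [h1, ihC x, h1]
          · intro x y
            rw [G', G', hgiff, pvConn_append_valid]
            have e1 : d.getD x x = d.getD y y ↔ pvConn es x y := ihK x y
            have e2 : d.getD x x = lu ↔ pvConn es x u := by rw [hlu]; exact ihK x u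
            have e3 : d.getD y y = lv ↔ pvConn es y v := by rw [hlv']; exact ihK y v
            have e4 : d.getD x x = lv ↔ pvConn es x v := by rw [hlv']; exact ihK x v
            have e5 : d.getD y y = lu ↔ pvConn es y u := by rw [hlu]; exact ihK y u
            constructor
            · rintro (h | ⟨h1, h2⟩ | ⟨h1, h2⟩)
              · exact Or.inl (e1.mp h)
              · exact Or.inr (Or.inl ⟨e2.mp h1, pvConn_symm es (e3.mp h2)⟩)
              · exact Or.inr (Or.inr ⟨e4.mp h1, pvConn_symm es (e5.mp h2)⟩)
            · rintro (h | ⟨h1, h2⟩ | ⟨h1, h2⟩)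
              · exact Or.inl (e1.mpr h)
              · exact Or.inr (Or.inl ⟨e2.mpr h1, e3.mpr (pvConn_symm es h2)⟩)
              · exact Or.inr (Or.inr ⟨e4.mpr h1, e5.mpr (pvConn_symm es h2)⟩)
        · -- lu = lv: no relabel
          rw [if_neg hne]
          have hlulv : lu = lv := by
            by_contra hc
            exact hne hc
          have huv : pvConn es u v := by
            refine (ihK u v).mp ?_
            rw [← hlu, ← hlv', hlulv]
          refine ⟨?_, d2VK, ?_, ?_⟩
          · intro a b hm
            rcases List.mem_append.mp hm with h | h
            · obtain ⟨h1, h2⟩ := ihE a b h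
              exact ⟨hcontmono _ h1, hcontmono _ h2⟩
            · simp only [List.mem_singleton] at h
              injection h with h1 h2
              injection h2 with h2 _
              subst h1 h2
              exact ⟨hcontu, hcontv⟩
          · intro x
            simp only [← hd2, Fget2]
            exact ihC x
          · intro x y
            rw [Fget2, Fget2, pvConn_append_valid, ihK]
            constructor
            · exact Or.inl
            · rintro (h | ⟨h1, h2⟩ | ⟨h1, h2⟩)
              · exact h
              · exact (h1.trans huv).trans h2
              · exact (h1.trans (pvConn_symm es huv)).trans h2
      · -- e = u :: v :: w :: t
        rw [show pvMergeStep (pvMergeB es) (u :: v :: w :: t) = pvMergeB es from rfl]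
        refine ⟨?_, ihVK, ihC, ?_⟩
        · intro a b hm
          rcases List.mem_append.mp hm with h | h
          · exact ihE a b h
          · simp at h
        · intro x y
          rw [ihK, pvConn_append_invalid (by intro a b h; simp at h)]


theorem pvL_kernel (edges : List (List Int)) (x y : Int) :
    pvL edges x = pvL edges y ↔ pvConn edges x y :=
  (pvMergeB_inv edges).2.2.2 x y

def pvUniv (edges : List (List Int)) : List Int :=
  PySem.Set.ofList (edges.flatMap (fun e => match e with | [u, v] => [u, v] | _ => ([] : List Int)))

theorem pvStep_cons (e : List Int) (es : List (List Int)) (x y : Int) :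
    pvStep (e :: es) x y ↔
      (∃ u v : Int, e = [u, v] ∧ ((x = u ∧ y = v) ∨ (x = v ∧ y = u))) ∨ pvStep es x y := by
  simp only [pvStep, List.mem_cons]
  constructor
  · rintro ⟨u, v, (h | h), hd⟩
    · exact Or.inl ⟨u, v, h.symm, hd⟩
    · exact Or.inr ⟨u, v, h, hd⟩
  · rintro (⟨u, v, h, hd⟩ | ⟨u, v, h, hd⟩)
    · exact ⟨u, v, Or.inl h.symm, hd⟩
    · exact ⟨u, v, Or.inr h, hd⟩

theorem pvMem_adjA_aux (es : List (List Int)) :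
    ∀ (acc : PySem.Dict Int (PySem.Set Int)) (x y : Int),
      y ∈ (es.foldl (fun adj e =>
        match e with
        | [u, v] =>
            (adj.modify u [] (fun s => PySem.Set.add s v)).modify v [] (fun s => PySem.Set.add s u)
        | _ => adj) acc).getD x []
      ↔ y ∈ acc.getD x [] ∨ pvStep es x y := by
  induction es with
  | nil => intro acc x y; simp [pvStep]
  | cons e es ih =>
      intro acc x y
      rcases e with _ | ⟨u, _ | ⟨v, _ | ⟨w, t⟩⟩⟩
      · simp only [List.foldl_cons, ih, pvStep_cons]
        constructor
        · rintro (h | h)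
          · exact Or.inl h
          · exact Or.inr (Or.inr h)
        · rintro (h | ⟨a, b, h, _⟩ | h)
          · exact Or.inl h
          · simp at h
          · exact Or.inr h
      · simp only [List.foldl_cons, ih, pvStep_cons]
        constructor
        · rintro (h | h)
          · exact Or.inl h
          · exact Or.inr (Or.inr h)
        · rintro (h | ⟨a, b, h, _⟩ | h)
          · exact Or.inl h
          · simp at h
          · exact Or.inr h
      · -- e = [u, v]
        simp only [List.foldl_cons, ih, pvStep_cons]
        have hmem : ∀ z : Int, z ∈ ((acc.modify u [] (fun s => PySem.Set.add s v)).modify v []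
            (fun s => PySem.Set.add s u)).getD x [] ↔
            z ∈ acc.getD x [] ∨ (x = u ∧ z = v) ∨ (x = v ∧ z = u) := by
          intro z
          by_cases hvu : v = u <;> by_cases hxv : x = v <;> by_cases hxu : x = u <;>
            simp_all [PySem.Dict.getD_modify, PySem.Set.mem_add]
        rw [hmem]
        constructor
        · rintro ((h | h) | h)
          · exact Or.inl h
          · exact Or.inr (Or.inl ⟨u, v, rfl, by tauto⟩)
          · exact Or.inr (Or.inr h)
        · rintro (h | ⟨a, b, h, hd⟩ | h)
          · exact Or.inl (Or.inl h)
          · injection h with h1 h2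
            injection h2 with h2 _
            subst h1 h2
            exact Or.inl (Or.inr (by tauto))
          · exact Or.inr h
      · simp only [List.foldl_cons, ih, pvStep_cons]
        constructor
        · rintro (h | h)
          · exact Or.inl h
          · exact Or.inr (Or.inr h)
        · rintro (h | ⟨a, b, h, _⟩ | h)
          · exact Or.inl h
          · simp at h
          · exact Or.inr h

theorem pvMem_adjA (edges : List (List Int)) (x y : Int) :
    y ∈ (pvAdjA edges).getD x [] ↔ pvStep edges x y := by
  rw [pvAdjA, pvMem_adjA_aux]
  simp [PySem.Dict.getD_empty]

theorem pvUniv_len (edges : List (List Int)) : (pvUniv edges).length ≤ 2 * edges.length := by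
  refine le_trans (PySem.Set.length_ofList_le _) ?_
  induction edges with
  | nil => simp
  | cons e es ih =>
      rcases e with _ | ⟨u, _ | ⟨v, _ | ⟨w, t⟩⟩⟩ <;>
        · simp only [List.flatMap_cons, List.length_append, List.length_cons, List.length_nil]
          omega

theorem pvAdjA_sub_univ (edges : List (List Int)) (x y : Int)
    (h : y ∈ (pvAdjA edges).getD x []) : x ∈ pvUniv edges ∧ y ∈ pvUniv edges := by
  rw [pvMem_adjA] at h
  rcases h with ⟨u, v, hm, hd⟩
  have hu : u ∈ pvUniv edges := by
    rw [pvUniv, PySem.Set.mem_ofList, List.mem_flatMap]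
    exact ⟨[u, v], hm, by simp⟩
  have hv : v ∈ pvUniv edges := by
    rw [pvUniv, PySem.Set.mem_ofList, List.mem_flatMap]
    exact ⟨[u, v], hm, by simp⟩
  rcases hd with ⟨rfl, rfl⟩ | ⟨rfl, rfl⟩ <;> exact ⟨by assumption, by assumption⟩

def pvCnt (edges : List (List Int)) (vis : PySem.Set Int) : Nat :=
  ((pvUniv edges).filter (fun x => !vis.contains x)).length

theorem pvCountP_mono_strict {α : Type} (U : List α) (p q : α → Bool)
    (himp : ∀ x, p x = true → q x = true) (a : α) (ha : a ∈ U)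
    (hq : q a = true) (hp : p a = false) :
    (U.filter p).length < (U.filter q).length := by
  induction U with
  | nil => simp at ha
  | cons b t ih =>
      rcases List.mem_cons.1 ha with rfl | hb
      · simp only [List.filter_cons, hp, hq]
        have : (t.filter p).length ≤ (t.filter q).length := by
          refine List.Sublist.length_le ?_
          exact List.monotone_filter_right t (by intro x hx; exact himp x hx)
        simp only [Bool.false_eq_true, if_false, if_true, List.length_cons]
        omega
      · have := ih hb
        simp only [List.filter_cons]
        by_cases hpb : p b = true
        · simp [hpb, himp b hpb]; omega
        · simp only [hpb, Bool.false_eq_true, if_false]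
          by_cases hqb : q b = true <;> simp [hqb] <;> omega

theorem pvNotContains_mono {s t : PySem.Set Int} (h : ∀ x, x ∈ s → x ∈ t) :
    ∀ x : Int, (!t.contains x) = true → (!s.contains x) = true := by
  intro x hx
  simp only [Bool.not_eq_true'] at *
  cases hcs : s.contains x with
  | false => rfl
  | true =>
      have hxs : x ∈ s := by simpa using hcs
      have hxt : x ∈ t := h x hxs
      rw [show t.contains x = true by simpa using hxt] at hx
      exact hx

theorem pvCnt_mono (edges : List (List Int)) {s t : PySem.Set Int}
    (h : ∀ x, x ∈ s → x ∈ t) : pvCnt edges t ≤ pvCnt edges s :=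
  List.Sublist.length_le (List.monotone_filter_right _ (fun x => pvNotContains_mono h x))

theorem pvCnt_lt (edges : List (List Int)) {s : PySem.Set Int} {v : Int}
    (hv : v ∈ pvUniv edges) (hns : v ∉ s) : pvCnt edges (PySem.Set.add s v) < pvCnt edges s := by
  refine pvCountP_mono_strict _ _ _
    (fun x => pvNotContains_mono (fun z hz => by simp [PySem.Set.mem_add, hz]) x) v hv ?_ ?_
  · simp only [Bool.not_eq_true']
    cases hcs : s.contains v with
    | false => rfl
    | true => exact absurd (by simpa using hcs) hns
  · show (!(PySem.Set.add s v).contains v) = false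
    simp [PySem.Set.mem_add]

def pvF (adj : PySem.Dict Int (PySem.Set Int)) (fuel : Nat) :
    PySem.Set Int × List Int → Int → PySem.Set Int × List Int :=
  fun st u => if st.1.contains u then st else pvDfsA adj fuel u st

theorem pvDfsA_succ (adj : PySem.Dict Int (PySem.Set Int)) (fuel : Nat) (v : Int)
    (st : PySem.Set Int × List Int) :
    pvDfsA adj (fuel + 1) v st =
      (adj.getD v []).foldl (pvF adj fuel) (PySem.Set.add st.1 v, st.2 ++ [v]) := rfl

theorem pvDfsA_mono (adj : PySem.Dict Int (PySem.Set Int)) :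
    ∀ (fuel : Nat) (v : Int) (st : PySem.Set Int × List Int),
      (∀ x, x ∈ st.1 → x ∈ (pvDfsA adj fuel v st).1) ∧
      (∃ t, (pvDfsA adj fuel v st).2 = st.2 ++ t) := by
  intro fuel
  induction fuel with
  | zero => exact fun v st => ⟨fun x hx => hx, ⟨[], by simp [pvDfsA]⟩⟩
  | succ fuel ih =>
      intro v st
      have hstep : ∀ (cur : PySem.Set Int × List Int) (u : Int),
          (∀ x, x ∈ cur.1 → x ∈ (pvF adj fuel cur u).1) ∧
          ∃ t, (pvF adj fuel cur u).2 = cur.2 ++ t := by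
        intro cur u
        unfold pvF
        by_cases hc : cur.1.contains u = true
        · simp only [hc, if_true]
          exact ⟨fun x hx => hx, ⟨[], by simp⟩⟩
        · simp only [hc]
          exact ih u cur
      have hfold : ∀ (us : List Int) (cur : PySem.Set Int × List Int),
          (∀ x, x ∈ cur.1 → x ∈ (us.foldl (pvF adj fuel) cur).1) ∧
          ∃ t, (us.foldl (pvF adj fuel) cur).2 = cur.2 ++ t := by
        intro us
        induction us with
        | nil => exact fun cur => ⟨fun x hx => hx, ⟨[], by simp⟩⟩
        | cons u us ihu =>
            intro cur
            obtain ⟨h1, t1, h2⟩ := hstep cur u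
            obtain ⟨h3, t2, h4⟩ := ihu (pvF adj fuel cur u)
            exact ⟨fun x hx => h3 x (h1 x hx),
              ⟨t1 ++ t2, by rw [List.foldl_cons, h4, h2, List.append_assoc]⟩⟩
      rw [pvDfsA_succ]
      obtain ⟨h1, t, h2⟩ := hfold (adj.getD v []) (PySem.Set.add st.1 v, st.2 ++ [v])
      exact ⟨fun x hx => h1 x ((PySem.Set.mem_add _ _ _).mpr (Or.inl hx)),
        ⟨v :: t, by rw [h2]; simp⟩⟩

theorem pvFoldF_mono (adj : PySem.Dict Int (PySem.Set Int)) (fuel : Nat) :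
    ∀ (us : List Int) (cur : PySem.Set Int × List Int),
      (∀ x, x ∈ cur.1 → x ∈ (us.foldl (pvF adj fuel) cur).1) ∧
      ∃ t, (us.foldl (pvF adj fuel) cur).2 = cur.2 ++ t := by
  intro us
  induction us with
  | nil => exact fun cur => ⟨fun x hx => hx, ⟨[], by simp⟩⟩
  | cons u us ihu =>
      intro cur
      have hstep : (∀ x, x ∈ cur.1 → x ∈ (pvF adj fuel cur u).1) ∧
          ∃ t, (pvF adj fuel cur u).2 = cur.2 ++ t := by
        unfold pvF
        by_cases hc : cur.1.contains u = true
        · simp only [hc, if_true]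
          exact ⟨fun x hx => hx, ⟨[], by simp⟩⟩
        · simp only [hc]
          exact pvDfsA_mono adj fuel u cur
      obtain ⟨h1, t1, h2⟩ := hstep
      obtain ⟨h3, t2, h4⟩ := ihu (pvF adj fuel cur u)
      exact ⟨fun x hx => h3 x (h1 x hx),
        ⟨t1 ++ t2, by rw [List.foldl_cons, h4, h2, List.append_assoc]⟩⟩

theorem pvDfsA_root (adj : PySem.Dict Int (PySem.Set Int)) (fuel : Nat) (v : Int)
    (st : PySem.Set Int × List Int) :
    v ∈ (pvDfsA adj (fuel + 1) v st).1 ∧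
    ∃ t, (pvDfsA adj (fuel + 1) v st).2 = st.2 ++ v :: t := by
  rw [pvDfsA_succ]
  obtain ⟨h1, t, h2⟩ := pvFoldF_mono adj fuel (adj.getD v []) (PySem.Set.add st.1 v, st.2 ++ [v])
  exact ⟨h1 v ((PySem.Set.mem_add _ _ _).mpr (Or.inr rfl)), ⟨t, by rw [h2]; simp⟩⟩

theorem pvDfsA_sound (adj : PySem.Dict Int (PySem.Set Int)) :
    ∀ (fuel : Nat) (v : Int) (st : PySem.Set Int × List Int) (x : Int),
      x ∈ (pvDfsA adj fuel v st).1 →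
      x ∈ st.1 ∨ Relation.ReflTransGen (fun a b => b ∈ adj.getD a []) v x := by
  intro fuel
  induction fuel with
  | zero => exact fun v st x hx => Or.inl hx
  | succ fuel ih =>
      intro v st x hx
      rw [pvDfsA_succ] at hx
      have inner : ∀ (us : List Int) (cur : PySem.Set Int × List Int),
          (∀ z, z ∈ cur.1 → z ∈ st.1 ∨ Relation.ReflTransGen (fun a b => b ∈ adj.getD a []) v z) →
          (∀ u ∈ us, u ∈ adj.getD v []) →
          ∀ z, z ∈ (us.foldl (pvF adj fuel) cur).1 →
            z ∈ st.1 ∨ Relation.ReflTransGen (fun a b => b ∈ adj.getD a []) v z := by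
        intro us
        induction us with
        | nil => exact fun cur hcur _ z hz => hcur z hz
        | cons u us ihu =>
            intro cur hcur hus z hz
            rw [List.foldl_cons] at hz
            refine ihu (pvF adj fuel cur u) ?_ (fun w hw => hus w (List.mem_cons_of_mem _ hw)) z hz
            intro w hw
            unfold pvF at hw
            by_cases hc : cur.1.contains u = true
            · rw [if_pos hc] at hw
              exact hcur w hw
            · rw [if_neg hc] at hw
              rcases ih u cur w hw with h | h
              · exact hcur w h
              · exact Or.inr (Relation.ReflTransGen.head (hus u List.mem_cons_self) h)
      refine inner _ _ ?_ (fun u hu => hu) x hx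
      intro z hz
      rcases (PySem.Set.mem_add _ _ _).mp hz with h | h
      · exact Or.inl h
      · exact Or.inr (h ▸ Relation.ReflTransGen.refl)

theorem pvDfsA_closed (edges : List (List Int)) :
    ∀ (fuel : Nat) (v : Int) (st : PySem.Set Int × List Int),
      v ∉ st.1 → pvCnt edges st.1 < fuel →
      ∀ x, x ∈ (pvDfsA (pvAdjA edges) fuel v st).1 → x ∉ st.1 →
        ∀ y, y ∈ (pvAdjA edges).getD x [] → y ∈ (pvDfsA (pvAdjA edges) fuel v st).1 := by
  intro fuel
  induction fuel with
  | zero => intro v st _ hfuel; omega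
  | succ fuel ih =>
      intro v st hv hfuel
      rw [pvDfsA_succ]
      by_cases hvU : v ∈ pvUniv edges
      case neg =>
        have hemp : (pvAdjA edges).getD v [] = [] := by
          cases hgd : (pvAdjA edges).getD v [] with
          | nil => rfl
          | cons y ys =>
              exact absurd (pvAdjA_sub_univ edges v y (by rw [hgd]; exact List.mem_cons_self)).1 hvU
        rw [hemp]
        intro x hx hxst y hy
        simp only [List.foldl_nil] at hx ⊢
        have hxv : x = v := by
          rcases (PySem.Set.mem_add _ _ _).mp hx with h | h
          · exact absurd h hxst
          · exact h
        subst hxv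
        rw [hemp] at hy
        simp at hy
      case pos =>
        have hcnt1 : pvCnt edges (PySem.Set.add st.1 v) < fuel :=
          lt_of_lt_of_le (pvCnt_lt edges hvU hv) (Nat.lt_succ_iff.mp hfuel)
        have inner : ∀ (us : List Int) (cur : PySem.Set Int × List Int),
            (∀ z, z ∈ PySem.Set.add st.1 v → z ∈ cur.1) →
            (∀ z, z ∈ cur.1 → z ∉ PySem.Set.add st.1 v →
              ∀ y, y ∈ (pvAdjA edges).getD z [] → y ∈ cur.1) →
            (∀ z, z ∈ (us.foldl (pvF (pvAdjA edges) fuel) cur).1 → z ∉ PySem.Set.add st.1 v →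
              ∀ y, y ∈ (pvAdjA edges).getD z [] → y ∈ (us.foldl (pvF (pvAdjA edges) fuel) cur).1) ∧
            (∀ u ∈ us, u ∈ (us.foldl (pvF (pvAdjA edges) fuel) cur).1) := by
          intro us
          induction us with
          | nil => exact fun cur _ hclo => ⟨hclo, by simp⟩
          | cons u us ihu =>
              intro cur hsub hclo
              by_cases hc : cur.1.contains u = true
              · have hFeq : pvF (pvAdjA edges) fuel cur u = cur := by unfold pvF; rw [if_pos hc]
                rw [List.foldl_cons, hFeq]
                obtain ⟨c2, c3⟩ := ihu cur hsub hclo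
                refine ⟨c2, ?_⟩
                intro w hw
                rcases List.mem_cons.mp hw with rfl | hmem
                · exact (pvFoldF_mono _ fuel us cur).1 w (by simpa using hc)
                · exact c3 w hmem
              · have hun : u ∉ cur.1 := by simpa using hc
                have hFeq : pvF (pvAdjA edges) fuel cur u = pvDfsA (pvAdjA edges) fuel u cur := by
                  unfold pvF; rw [if_neg hc]
                rw [List.foldl_cons, hFeq]
                have hcntcur : pvCnt edges cur.1 < fuel :=
                  lt_of_le_of_lt (pvCnt_mono edges (fun z hz => hsub z hz)) hcnt1
                have hmono := (pvDfsA_mono (pvAdjA edges) fuel u cur).1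
                have hsub' : ∀ z, z ∈ PySem.Set.add st.1 v → z ∈ (pvDfsA (pvAdjA edges) fuel u cur).1 :=
                  fun z hz => hmono z (hsub z hz)
                have hclo' : ∀ z, z ∈ (pvDfsA (pvAdjA edges) fuel u cur).1 →
                    z ∉ PySem.Set.add st.1 v →
                    ∀ y, y ∈ (pvAdjA edges).getD z [] → y ∈ (pvDfsA (pvAdjA edges) fuel u cur).1 := by
                  intro z hz hzv y hy
                  by_cases hzc : z ∈ cur.1
                  · exact hmono y (hclo z hzc hzv y hy)
                  · exact ih u cur hun hcntcur z hz hzc y hy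
                obtain ⟨c2, c3⟩ := ihu (pvDfsA (pvAdjA edges) fuel u cur) hsub' hclo'
                refine ⟨c2, ?_⟩
                intro w hw
                rcases List.mem_cons.mp hw with rfl | hmem
                · have hfuel1 : ∃ f, fuel = f + 1 := ⟨fuel - 1, by omega⟩
                  obtain ⟨f, rfl⟩ := hfuel1
                  have hroot := (pvDfsA_root (pvAdjA edges) f w cur).1
                  exact (pvFoldF_mono _ (f + 1) us _).1 w hroot
                · exact c3 w hmem
        obtain ⟨c2, c3⟩ := inner ((pvAdjA edges).getD v []) (PySem.Set.add st.1 v, st.2 ++ [v])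
          (fun z hz => hz)
          (fun z hz hzv => absurd hz hzv)
        intro x hx hxst y hy
        by_cases hxv : x ∈ PySem.Set.add st.1 v
        · have : x = v := by
            rcases (PySem.Set.mem_add _ _ _).mp hxv with h | h
            · exact absurd h hxst
            · exact h
          subst this
          exact c3 y hy
        · exact c2 x hx hxv y hy

theorem pvDfsA_spec (edges : List (List Int)) (fuel : Nat) (v : Int)
    (st : PySem.Set Int × List Int)
    (hclosed : ∀ x y, x ∈ st.1 → pvConn edges x y → y ∈ st.1)
    (hv : v ∉ st.1) (hfuel : pvCnt edges st.1 < fuel) :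
    ∀ x, x ∈ (pvDfsA (pvAdjA edges) fuel v st).1 ↔ x ∈ st.1 ∨ pvConn edges v x := by
  intro x
  constructor
  · intro hx
    rcases pvDfsA_sound (pvAdjA edges) fuel v st x hx with h | h
    · exact Or.inl h
    · exact Or.inr (Relation.ReflTransGen.mono
        (fun a b hb => (pvMem_adjA edges a b).mp hb) h)
  · rintro (h | h)
    · exact (pvDfsA_mono (pvAdjA edges) fuel v st).1 x h
    · induction h with
      | refl =>
          obtain ⟨f, rfl⟩ : ∃ f, fuel = f + 1 := ⟨fuel - 1, by omega⟩
          exact (pvDfsA_root (pvAdjA edges) f v st).1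
      | tail hvw hwz ihw =>
          rename_i w z
          have hy : z ∈ (pvAdjA edges).getD w [] := (pvMem_adjA edges w z).mpr hwz
          by_cases hwst : w ∈ st.1
          · exact (pvDfsA_mono (pvAdjA edges) fuel v st).1 z
              (hclosed w z hwst (Relation.ReflTransGen.single hwz))
          · exact pvDfsA_closed edges fuel v st hv hfuel w ihw hwst z hy

-- ---------- the two main loops ----------

theorem pvPyGetD_append_left (xs ys : List Int) (i : Int) (d : Int)
    (h0 : 0 ≤ i) (h : i < (xs.length : Int)) :
    PySem.List.pyGetD (xs ++ ys) i d = PySem.List.pyGetD xs i d := by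
  obtain ⟨n, rfl⟩ : ∃ n : Nat, i = (n : Int) := ⟨i.toNat, (Int.toNat_of_nonneg h0).symm⟩
  rw [PySem.List.pyGetD_natCast, PySem.List.pyGetD_natCast]
  have hn : n < xs.length := by exact_mod_cast h
  exact List.getD_append _ _ _ _ hn

theorem pvGetLast?_eq_getD (hs : List Int) (hne : hs ≠ []) :
    hs.getLast? = some (hs.getD (hs.length - 1) 0) := by
  rw [List.getLast?_eq_getElem?, List.getD_eq_getElem?_getD]
  have hlen : hs.length - 1 < hs.length := by
    cases hs with
    | nil => exact absurd rfl hne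
    | cons a t => simp
  rw [List.getElem?_eq_getElem hlen]
  rfl

theorem pvConsecPairs_snoc (hs : List Int) (x : Int) :
    pvConsecPairs (hs ++ [x]) =
      pvConsecPairs hs ++ (match hs.getLast? with | none => [] | some p => [[p, x]]) := by
  induction hs with
  | nil => rfl
  | cons a t ih =>
      cases t with
      | nil => rfl
      | cons b t' =>
          show pvConsecPairs (a :: b :: (t' ++ [x])) = _
          rw [show pvConsecPairs (a :: b :: (t' ++ [x])) = [a, b] :: pvConsecPairs (b :: (t' ++ [x])) from rfl]
          rw [show (b :: (t' ++ [x])) = (b :: t') ++ [x] from rfl, ih]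
          rfl

theorem pvPairs_aux (hs : List Int) :
    ∀ acc : List (List Int),
    (PySem.List.pyRange 0 ((hs.length : Int) - 1) 1).foldl
      (fun res i =>
        res ++ [[PySem.List.pyGetD hs i 0, PySem.List.pyGetD hs (i + 1) 0]]) acc
    = acc ++ pvConsecPairs hs := by
  induction hs using List.reverseRecOn with
  | nil =>
      intro acc
      rw [PySem.List.pyRange_one_eq_nil (by simp)]
      simp [pvConsecPairs]
  | append_singleton hs x ih =>
      intro acc
      by_cases hhs : hs = []
      · subst hhs
        rw [show ((([] : List Int) ++ [x]).length : Int) - 1 = 0 by simp]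
        rw [PySem.List.pyRange_one_eq_nil le_rfl]
        simp [pvConsecPairs]
      · have hL : 1 ≤ hs.length := by
          cases hs with
          | nil => exact absurd rfl hhs
          | cons a t => simp
        have hlen : ((hs ++ [x]).length : Int) - 1 = ((hs.length - 1 : Nat) : Int) + 1 := by
          simp
          omega
        rw [hlen, PySem.List.pyRange_one_succ_right (by positivity)]
        rw [List.foldl_append]
        have hcongr : (PySem.List.pyRange 0 ((hs.length - 1 : Nat) : Int) 1).foldl
            (fun res i =>
              res ++ [[PySem.List.pyGetD (hs ++ [x]) i 0, PySem.List.pyGetD (hs ++ [x]) (i + 1) 0]]) acc =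
            (PySem.List.pyRange 0 ((hs.length - 1 : Nat) : Int) 1).foldl
            (fun res i =>
              res ++ [[PySem.List.pyGetD hs i 0, PySem.List.pyGetD hs (i + 1) 0]]) acc := by
          refine PySem.List.foldl_congr_mem _ _ _ _ ?_
          intro res i hi
          rw [PySem.List.mem_pyRange_one] at hi
          have h1 : i < (hs.length : Int) := by omega
          have h2 : i + 1 < (hs.length : Int) := by omega
          rw [pvPyGetD_append_left hs [x] i 0 hi.1 h1,
              pvPyGetD_append_left hs [x] (i + 1) 0 (by omega) h2]
        rw [hcongr]
        have hih : (PySem.List.pyRange 0 ((hs.length - 1 : Nat) : Int) 1).foldl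
            (fun res i =>
              res ++ [[PySem.List.pyGetD hs i 0, PySem.List.pyGetD hs (i + 1) 0]]) acc =
            acc ++ pvConsecPairs hs := by
          have : ((hs.length : Int) - 1) = ((hs.length - 1 : Nat) : Int) := by omega
          rw [← this]
          exact ih acc
        rw [hih]
        have hg1 : PySem.List.pyGetD (hs ++ [x]) ((hs.length - 1 : Nat) : Int) 0 =
            hs.getD (hs.length - 1) 0 := by
          rw [pvPyGetD_append_left hs [x] _ 0 (by positivity) (by exact_mod_cast by omega),
              PySem.List.pyGetD_natCast]
        have hg2 : PySem.List.pyGetD (hs ++ [x]) (((hs.length - 1 : Nat) : Int) + 1) 0 = x := by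
          have : (((hs.length - 1 : Nat) : Int) + 1) = ((hs.length : Nat) : Int) := by omega
          rw [this, PySem.List.pyGetD_natCast]
          rw [List.getD_append_right _ _ _ _ le_rfl]
          simp
        simp only [List.foldl_cons, List.foldl_nil]
        rw [hg1, hg2, pvConsecPairs_snoc, pvGetLast?_eq_getD hs hhs]
        simp

theorem pvReps_succ (edges : List (List Int)) (k : Nat) :
    pvReps edges ((k : Int) + 1) =
      pvReps edges (k : Int) ++ (if pvPred edges (k : Int) then [(k : Int)] else []) := by
  rw [pvReps, pvReps, PySem.List.pyRange_one_succ_right (by positivity), List.filter_append]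
  simp [List.filter_cons]

theorem pvB_loop (edges : List (List Int)) (k : Nat) :
    ((PySem.List.pyRange 0 (k : Int) 1).foldl
        (fun (st : List (List Int) × PySem.Set Int × Option Int) i =>
          let li := (pvMergeB edges).getD i i
          if st.2.1.contains li then st
          else
            ((match st.2.2 with
              | none => st.1
              | some p => st.1 ++ [[p, i]]),
             PySem.Set.add st.2.1 li, some i))
        (edges, [], none)) =
      (edges ++ pvConsecPairs (pvReps edges (k : Int)),
       PySem.Set.ofList ((PySem.List.pyRange 0 (k : Int) 1).map (pvL edges)),
       (pvReps edges (k : Int)).getLast?) := by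
  induction k with
  | zero =>
      rw [show ((0 : Nat) : Int) = 0 from rfl, PySem.List.pyRange_one_eq_nil le_rfl]
      simp [pvReps, PySem.List.pyRange_one_eq_nil le_rfl, pvConsecPairs]
  | succ k ih =>
      have hcast : ((k + 1 : Nat) : Int) = (k : Int) + 1 := by push_cast; ring
      rw [hcast, PySem.List.pyRange_one_succ_right (by positivity), List.foldl_append, ih,
        List.foldl_cons, List.foldl_nil]
      have hmemiff : ((PySem.Set.ofList ((PySem.List.pyRange 0 (k : Int) 1).map (pvL edges))).contains
          ((pvMergeB edges).getD (k : Int) (k : Int)) = true) ↔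
          ¬ pvPred edges (k : Int) = true := by
        rw [PySem.Set.contains_iff, PySem.Set.mem_ofList, List.mem_map, pvPred]
        simp only [decide_eq_true_eq, not_forall]
        constructor
        · rintro ⟨j, hj, hLj⟩
          exact ⟨j, hj, fun hne => hne hLj⟩
        · rintro ⟨j, hj, hLj⟩
          exact ⟨j, hj, of_not_not hLj⟩
      by_cases hp : pvPred edges (k : Int) = true
      · have hcont : ((PySem.Set.ofList ((PySem.List.pyRange 0 (k : Int) 1).map (pvL edges))).contains
            ((pvMergeB edges).getD (k : Int) (k : Int))) = false := by
          rw [← Bool.not_eq_true, hmemiff]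
          simp [hp]
        simp only [hcont, Bool.false_eq_true, if_false]
        rw [pvReps_succ, hp, if_pos rfl]
        refine Prod.ext ?_ (Prod.ext ?_ ?_)
        · show _ = edges ++ pvConsecPairs (pvReps edges (k : Int) ++ [(k : Int)])
          rw [pvConsecPairs_snoc]
          cases hlast : (pvReps edges (k : Int)).getLast? with
          | none => simp
          | some p => simp
        · show PySem.Set.add _ _ = _
          rw [List.map_append, List.map_cons, List.map_nil, PySem.Set.ofList_append_singleton]
          rfl
        · show some (k : Int) = _
          rw [List.getLast?_concat]
      · have hcont : ((PySem.Set.ofList ((PySem.List.pyRange 0 (k : Int) 1).map (pvL edges))).contains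
            ((pvMergeB edges).getD (k : Int) (k : Int))) = true := by
          rw [hmemiff]; exact hp
        simp only [hcont, if_true]
        rw [pvReps_succ, if_neg hp]
        refine Prod.ext ?_ (Prod.ext ?_ ?_)
        · simp
        · show _ = PySem.Set.ofList _
          rw [List.map_append, List.map_cons, List.map_nil, PySem.Set.ofList_append_singleton]
          rw [PySem.Set.add_of_mem]
          rw [PySem.Set.mem_ofList]
          have := hmemiff.mpr hp
          rw [PySem.Set.contains_iff, PySem.Set.mem_ofList] at this
          exact this
        · simp


theorem pvA_loop (edges : List (List Int)) (k : Nat) :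
    (∀ x, x ∈ ((PySem.List.pyRange 0 (k : Int) 1).foldl
        (fun (st : PySem.Set Int × List (List Int)) i =>
          if st.1.contains i then st
          else
            let r := pvDfsA (pvAdjA edges) (2 * edges.length + 1) i (st.1, [])
            (r.1, st.2 ++ [r.2]))
        ([], [])).1 ↔ ∃ j : Int, 0 ≤ j ∧ j < (k : Int) ∧ pvConn edges j x) ∧
    ((PySem.List.pyRange 0 (k : Int) 1).foldl
        (fun (st : PySem.Set Int × List (List Int)) i =>
          if st.1.contains i then st
          else
            let r := pvDfsA (pvAdjA edges) (2 * edges.length + 1) i (st.1, [])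
            (r.1, st.2 ++ [r.2]))
        ([], [])).2.map (fun c => PySem.List.pyGetD c 0 0) = pvReps edges (k : Int) := by
  induction k with
  | zero =>
      rw [show ((0 : Nat) : Int) = 0 from rfl, PySem.List.pyRange_one_eq_nil le_rfl]
      constructor
      · intro x
        simp only [List.foldl_nil]
        constructor
        · intro hx
          simp at hx
        · rintro ⟨j, h0, hk, _⟩
          omega
      · simp [pvReps, PySem.List.pyRange_one_eq_nil le_rfl]
  | succ k ih =>
      obtain ⟨ih1, ih2⟩ := ih
      have hcast : ((k + 1 : Nat) : Int) = (k : Int) + 1 := by push_cast; ring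
      rw [hcast, PySem.List.pyRange_one_succ_right (by positivity), List.foldl_append,
        List.foldl_cons, List.foldl_nil]
      set stk := (PySem.List.pyRange 0 (k : Int) 1).foldl
        (fun (st : PySem.Set Int × List (List Int)) i =>
          if st.1.contains i then st
          else
            let r := pvDfsA (pvAdjA edges) (2 * edges.length + 1) i (st.1, [])
            (r.1, st.2 ++ [r.2]))
        ([], []) with hstk
      have hcontiff : (stk.1.contains (k : Int) = true) ↔ ¬ (pvPred edges (k : Int) = true) := by
        rw [PySem.Set.contains_iff, ih1, pvPred]
        simp only [decide_eq_true_eq, not_forall]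
        constructor
        · rintro ⟨j, h0, hk, hc⟩
          refine ⟨j, PySem.List.mem_pyRange_one.mpr ⟨h0, hk⟩, ?_⟩
          intro hne
          exact hne ((pvL_kernel edges j (k : Int)).mpr hc)
        · rintro ⟨j, hj, hne⟩
          obtain ⟨h0, hk⟩ := PySem.List.mem_pyRange_one.mp hj
          exact ⟨j, h0, hk, (pvL_kernel edges j (k : Int)).mp (of_not_not hne)⟩
      by_cases hp : pvPred edges (k : Int) = true
      · have hcont : stk.1.contains (k : Int) = false := by
          rw [← Bool.not_eq_true, hcontiff]
          simp [hp]
        simp only [hcont, Bool.false_eq_true, if_false]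
        have hknot : (k : Int) ∉ stk.1 := by
          intro hmem
          rw [← PySem.Set.contains_iff] at hmem
          rw [hcont] at hmem
          exact Bool.false_ne_true hmem
        have hclosed : ∀ x y, x ∈ stk.1 → pvConn edges x y → y ∈ stk.1 := by
          intro x y hx hc
          obtain ⟨j, h0, hk, hcj⟩ := (ih1 x).mp hx
          exact (ih1 y).mpr ⟨j, h0, hk, hcj.trans hc⟩
        have hfuel : pvCnt edges stk.1 < 2 * edges.length + 1 := by
          have h1 : pvCnt edges stk.1 ≤ (pvUniv edges).length := List.length_filter_le _ _
          have h2 := pvUniv_len edges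
          omega
        have hspec := pvDfsA_spec edges (2 * edges.length + 1) (k : Int) (stk.1, [])
          hclosed hknot hfuel
        obtain ⟨f, hf⟩ : ∃ f, 2 * edges.length + 1 = f + 1 := ⟨2 * edges.length, rfl⟩
        constructor
        · intro x
          show x ∈ (pvDfsA (pvAdjA edges) (2 * edges.length + 1) (k : Int) (stk.1, [])).1 ↔ _
          rw [hspec x]
          constructor
          · rintro (hx | hx)
            · obtain ⟨j, h0, hk, hc⟩ := (ih1 x).mp hx
              exact ⟨j, h0, by omega, hc⟩
            · exact ⟨(k : Int), by positivity, by omega, hx⟩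
          · rintro ⟨j, h0, hlt, hc⟩
            by_cases hjk : j < (k : Int)
            · exact Or.inl ((ih1 x).mpr ⟨j, h0, hjk, hc⟩)
            · have : j = (k : Int) := by omega
              subst this
              exact Or.inr hc
        · show (stk.2 ++ [(pvDfsA (pvAdjA edges) (2 * edges.length + 1) (k : Int) (stk.1, [])).2]).map
            (fun c => PySem.List.pyGetD c 0 0) = _
          rw [List.map_append, List.map_cons, List.map_nil, ih2]
          obtain ⟨t, ht⟩ := (hf ▸ pvDfsA_root (pvAdjA edges) f (k : Int) (stk.1, [])).2
          rw [ht]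
          simp only [List.nil_append, PySem.List.pyGetD_zero_cons]
          rw [pvReps_succ, hp, if_pos rfl]
      · have hcont : stk.1.contains (k : Int) = true := hcontiff.mpr hp
        simp only [hcont, if_true]
        constructor
        · intro x
          rw [ih1]
          constructor
          · rintro ⟨j, h0, hk, hc⟩
            exact ⟨j, h0, by omega, hc⟩
          · rintro ⟨j, h0, hlt, hc⟩
            by_cases hjk : j < (k : Int)
            · exact ⟨j, h0, hjk, hc⟩
            · have : j = (k : Int) := by omega
              subst this
              obtain ⟨j', h0', hk', hc'⟩ := (ih1 (k : Int)).mp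
                (by rw [← PySem.Set.contains_iff]; exact hcont)
              exact ⟨j', h0', hk', hc'.trans hc⟩
        · rw [ih2, pvReps_succ, if_neg hp]
          simp

-- ===== VERDICT (by name: the statement is the Claim_ definition above) =====
theorem ensure_connected_py_spec : Claim_equal_ensure_connected_py := by
  intro n edges _hdom _hpre
  unfold Spec_ensure_connected_py
  by_cases hle : n ≤ 1
  · simp [ensure_connected_py, ensure_connected_py_alt, hle]
  · have hn0 : 0 ≤ n := by omega
    obtain ⟨k, hk⟩ : ∃ k : Nat, (k : Int) = n := ⟨n.toNat, Int.toNat_of_nonneg hn0⟩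
    obtain ⟨hA1, hA2⟩ := pvA_loop edges k
    have hB := pvB_loop edges k
    rw [ensure_connected_py, ensure_connected_py_alt, if_neg hle, if_neg hle]
    simp only [← hk] at *
    set stk := (PySem.List.pyRange 0 (k : Int) 1).foldl
        (fun (st : PySem.Set Int × List (List Int)) i =>
          if st.1.contains i then st
          else
            let r := pvDfsA (pvAdjA edges) (2 * edges.length + 1) i (st.1, [])
            (r.1, st.2 ++ [r.2]))
        ([], []) with hstk
    rw [hB]
    have hswitch : (PySem.List.pyRange 0 ((stk.2.length : Int) - 1) 1).foldl
        (fun res i =>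
          res ++ [[PySem.List.pyGetD (PySem.List.pyGetD stk.2 i []) 0 0,
                   PySem.List.pyGetD (PySem.List.pyGetD stk.2 (i + 1) []) 0 0]])
        edges =
        (PySem.List.pyRange 0 (((pvReps edges (k : Int)).length : Int) - 1) 1).foldl
        (fun res i =>
          res ++ [[PySem.List.pyGetD (pvReps edges (k : Int)) i 0,
                   PySem.List.pyGetD (pvReps edges (k : Int)) (i + 1) 0]])
        edges := by
      have hlen : stk.2.length = (pvReps edges (k : Int)).length := by
        rw [← hA2, List.length_map]
      rw [hlen]
      refine PySem.List.foldl_congr_mem _ _ _ _ ?_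
      intro res i _
      have hget : ∀ j : Int, PySem.List.pyGetD (pvReps edges (k : Int)) j 0 =
          PySem.List.pyGetD (stk.2.map (fun c => PySem.List.pyGetD c 0 0)) j
            (PySem.List.pyGetD ([] : List Int) 0 0) := by
        intro j
        rw [hA2]
        rfl
      rw [hget i, hget (i + 1), PySem.List.pyGetD_map, PySem.List.pyGetD_map]
    rw [hswitch, pvPairs_aux]
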